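-- pv_equiv track=rewrite | github.com/AaronGG11/Natural-Language-Processing | 6_Clustering/index.py | getVectorFrecuency
-- ===== SOURCE A (Python) =====
-- def getVectorFrecuency(vocabulary, sentences):
--     import operator
--     vector = []
--
--     for sentence in sentences:
--         aux = []
--         for token in vocabulary:
--             aux.append(sentence.count(token))
--
--         vector.append(aux)
--
--     return vector
-- ===== SOURCE B (Python) =====
-- def getVectorFrecuency(vocabulary, sentences):
--     # column index: vocab token -> list of column positions (duplicates kept)
--     columns = {}
--     for i, token in enumerate(vocabulary):
--         columns.setdefault(token, []).append(i)
--     vector = []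
--     for sentence in sentences:
--         vec = [0] * len(vocabulary)
--         for token in sentence:
--             for j in columns.get(token, []):
--                 vec[j] += 1
--         vector.append(vec)
--     return vector
-- ===== Notes on version B (the rewrite author's own statement) =====
-- stated objective: faster
-- what changed: Inverts the traversal: instead of A's gather (rescanning each sentence with .count once per vocabulary term), B precomputes a vocab-token -> column-indices map once, starts each row as a zero vector and scatters +1 increments into the mapped columns in a single pass over the sentence's tokens.
import Mathlib
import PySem

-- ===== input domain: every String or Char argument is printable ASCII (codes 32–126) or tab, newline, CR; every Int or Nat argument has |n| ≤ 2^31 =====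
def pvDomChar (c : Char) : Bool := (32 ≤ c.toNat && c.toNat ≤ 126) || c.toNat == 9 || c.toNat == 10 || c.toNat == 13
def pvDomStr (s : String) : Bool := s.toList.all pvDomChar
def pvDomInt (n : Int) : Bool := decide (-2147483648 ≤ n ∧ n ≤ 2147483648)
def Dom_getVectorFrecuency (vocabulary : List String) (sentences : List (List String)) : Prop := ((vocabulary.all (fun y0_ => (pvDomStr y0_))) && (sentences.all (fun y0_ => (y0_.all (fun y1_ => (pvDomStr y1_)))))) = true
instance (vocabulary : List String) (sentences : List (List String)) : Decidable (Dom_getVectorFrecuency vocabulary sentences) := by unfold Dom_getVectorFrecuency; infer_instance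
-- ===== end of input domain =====

-- B inverts A's traversal: a vocab-token -> column-indices map built once, then each row
-- starts as a zero vector and counts are scattered in one pass over the sentence (faster).

-- ===== PORT A =====
-- A: for each sentence, for each token in vocabulary, append sentence.count(token)
def getVectorFrecuency (vocabulary : List String) (sentences : List (List String)) : List (List Int) :=
  sentences.foldl (fun vector sentence =>
    vector ++ [vocabulary.foldl (fun aux token => aux ++ [(PySem.List.count sentence token : Int)]) []]) []

-- ===== PORT B =====
-- columns = {}; for i, token in enumerate(vocabulary): columns.setdefault(token, []).append(i)
-- (setdefault + in-place append = insert the old list, default [], with i appended)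
def pvColumns (vocabulary : List String) : PySem.Dict String (List Int) :=
  (PySem.List.enumerate vocabulary).foldl
    (fun d p => d.insert p.2 (d.getD p.2 [] ++ [p.1])) PySem.Dict.empty

-- B: per sentence, vec = [0]*len(vocabulary); for token in sentence:
--      for j in columns.get(token, []): vec[j] += 1;  vector.append(vec)
def getVectorFrecuency_alt (vocabulary : List String) (sentences : List (List String)) : List (List Int) :=
  let columns := pvColumns vocabulary
  sentences.foldl (fun vector sentence =>
    vector ++ [sentence.foldl (fun vec token =>
      ((columns.getD token []).foldl
        (fun v j => PySem.List.pySetD v j (PySem.List.pyGetD v j 0 + 1)) vec))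
      (List.replicate vocabulary.length (0 : Int))]) []

-- ===== PRECONDITION & SPEC =====
def Spec_getVectorFrecuency (vocabulary : List String) (sentences : List (List String)) (out : List (List Int)) : Prop := out = getVectorFrecuency_alt vocabulary sentences
instance (vocabulary : List String) (sentences : List (List String)) (out : List (List Int)) : Decidable (Spec_getVectorFrecuency vocabulary sentences out) := by unfold Spec_getVectorFrecuency; infer_instance

-- ===== CLAIM (what is proved, stated in full; the proofs are below) =====
def Claim_equal_getVectorFrecuency : Prop := ∀ (vocabulary : List String) (sentences : List (List String)), Dom_getVectorFrecuency vocabulary sentences → Spec_getVectorFrecuency vocabulary sentences (getVectorFrecuency vocabulary sentences)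

-- ===== LEMMAS AND PROOFS =====

-- A foldl that appends one element per input element is a map.
theorem pv_foldl_append_map {α β : Type} (f : α → β) (l : List α) (acc : List β) :
    l.foldl (fun r x => r ++ [f x]) acc = acc ++ l.map f := by
  induction l generalizing acc with
  | nil => simp
  | cons a t ih => simp [List.foldl, ih]

-- The index-building fold, characterised: the bucket of t is the first components of
-- the enumerate pairs whose token equals t.
theorem pv_columns_fold (pairs : List (Int × String)) (d : PySem.Dict String (List Int)) (t : String) :
    ((pairs.foldl (fun d p => d.insert p.2 (d.getD p.2 [] ++ [p.1])) d).getD t []) =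
      d.getD t [] ++ (pairs.filter (fun p => p.2 == t)).map Prod.fst := by
  induction pairs generalizing d with
  | nil => simp
  | cons p rest ih =>
      simp only [List.foldl_cons, List.filter_cons, ih]
      by_cases h : p.2 = t
      · simp [h]
      · simp [h, PySem.Dict.getD_insert, Ne.symm h]

theorem pv_columns_getD (vocabulary : List String) (t : String) :
    (pvColumns vocabulary).getD t [] =
      ((PySem.List.enumerate vocabulary).filter (fun p => p.2 == t)).map Prod.fst := by
  simp [pvColumns, pv_columns_fold]

-- bucket members are valid nonnegative column indices
theorem pv_columns_mem (vocabulary : List String) (t : String) (j : Int)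
    (hj : j ∈ (pvColumns vocabulary).getD t []) : 0 ≤ j ∧ j < (vocabulary.length : Int) := by
  rw [pv_columns_getD] at hj
  obtain ⟨p, hp, rfl⟩ := List.mem_map.1 hj
  have hp' := List.mem_of_mem_filter hp
  rw [PySem.List.mem_enumerate_iff] at hp'
  obtain ⟨k, hk, rfl⟩ := hp'
  refine ⟨by omega, ?_⟩
  simp
  omega

-- how many times column k occurs in t's bucket: once iff vocabulary[k] = t
theorem pv_columns_count_aux (vocabulary : List String) (t : String) (s : Int) (k : Nat)
    (hk : k < vocabulary.length) :
    (((PySem.List.enumerate vocabulary s).filter (fun p => p.2 == t)).map Prod.fst).count (s + k) =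
      if vocabulary[k] = t then 1 else 0 := by
  induction vocabulary generalizing s k with
  | nil => simp at hk
  | cons x xs ih =>
      rw [PySem.List.enumerate_cons]
      cases k with
      | zero =>
          have hzero : ∀ q ∈ ((PySem.List.enumerate xs (s+1)).filter (fun p => p.2 == t)).map Prod.fst,
              q ≠ s + (0:Nat) := by
            intro q hq
            obtain ⟨p, hp, rfl⟩ := List.mem_map.1 hq
            have hp' := List.mem_of_mem_filter hp
            rw [PySem.List.mem_enumerate_iff] at hp'
            obtain ⟨m, hm, rfl⟩ := hp'
            simp; omega
          by_cases h : x = t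
          · simp only [List.filter_cons, h, BEq.rfl, if_true, List.map_cons,
              List.count_cons, List.count_eq_zero.2 (fun hq => (hzero _ hq rfl).elim)]
            simp
          · have hb : ((s, x).2 == t) = false := by simp [h]
            simp only [List.filter_cons, hb, Bool.false_eq_true, if_false]
            rw [List.count_eq_zero.2 (fun hq => (hzero _ hq rfl).elim)]
            simp [h]
      | succ m =>
          have hm : m < xs.length := by simpa using hk
          have tail := ih (s+1) m hm
          have harith : (s + 1) + (m : Int) = s + ((m+1 : Nat) : Int) := by push_cast; ring
          rw [harith] at tail
          by_cases h : x = t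
          · simp only [List.filter_cons, h, BEq.rfl, if_true, List.map_cons, List.count_cons]
            rw [tail]
            have hne : ¬ ((m : Int) + 1 = 0) := by omega
            simp [hne]
          · have hb : ((s, x).2 == t) = false := by simp [h]
            simp only [List.filter_cons, hb, Bool.false_eq_true, if_false]
            exact tail

theorem pv_columns_count (vocabulary : List String) (t : String) (k : Nat)
    (hk : k < vocabulary.length) :
    ((pvColumns vocabulary).getD t []).count (k : Int) = if vocabulary[k] = t then 1 else 0 := by
  have := pv_columns_count_aux vocabulary t 0 k hk
  rw [pv_columns_getD]
  simpa using this

-- the scatter inner loop preserves the length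
theorem pv_scatter_len (idxs : List Int) (v : List Int) :
    (idxs.foldl (fun v j => PySem.List.pySetD v j (PySem.List.pyGetD v j 0 + 1)) v).length
      = v.length := by
  induction idxs generalizing v with
  | nil => rfl
  | cons j rest ih => simp [List.foldl_cons, ih, PySem.List.length_pySetD]

-- effect of the scatter inner loop at a valid column k: add the number of occurrences of k
theorem pv_scatter_inner (idxs : List Int) (v : List Int) (k : Nat) (hk : k < v.length)
    (hb : ∀ j ∈ idxs, 0 ≤ j ∧ j < (v.length : Int)) :
    (idxs.foldl (fun v j => PySem.List.pySetD v j (PySem.List.pyGetD v j 0 + 1)) v).getD k 0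
      = v.getD k 0 + idxs.count (k : Int) := by
  induction idxs generalizing v with
  | nil => simp
  | cons j rest ih =>
      obtain ⟨hj0, hjlt⟩ := hb j (by simp)
      have hjn : j.toNat < v.length := by omega
      have hset : PySem.List.pySetD v j (PySem.List.pyGetD v j 0 + 1)
          = v.set j.toNat (v.getD j.toNat 0 + 1) := by
        rw [PySem.List.pySetD_of_nonneg _ _ hj0]
        congr 1
        have : (j.toNat : Int) = j := by omega
        rw [← this, PySem.List.pyGetD_natCast]
        simp [this]
      rw [List.foldl_cons, hset, ih _ (by simpa using hk)
        (fun x hx => by simpa [List.length_set] using hb x (by simp [hx]))]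
      by_cases hjk : j.toNat = k
      · subst hjk
        have hj' : j = ((j.toNat : Nat) : Int) := by omega
        simp [List.getD_eq_getElem?_getD, List.getElem?_set_self hjn, ← hj',
          List.getElem?_eq_getElem hjn]
        ring
      · have hj' : j ≠ (k : Int) := by omega
        simp [List.getD_eq_getElem?_getD, List.getElem?_set_ne hjk, hj']

-- the per-sentence scatter loop: start vector plus the per-column token counts
theorem pv_scatter_sentence (vocabulary : List String) (sentence : List String)
    (v : List Int) (hv : v.length = vocabulary.length) (k : Nat) (hk : k < vocabulary.length) :
    (sentence.foldl (fun vec token =>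
        (((pvColumns vocabulary).getD token []).foldl
          (fun v j => PySem.List.pySetD v j (PySem.List.pyGetD v j 0 + 1)) vec)) v).getD k 0
      = v.getD k 0 + (sentence.count vocabulary[k] : Int) := by
  induction sentence generalizing v with
  | nil => simp
  | cons tok rest ih =>
      rw [List.foldl_cons]
      have hlen : (((pvColumns vocabulary).getD tok []).foldl
          (fun v j => PySem.List.pySetD v j (PySem.List.pyGetD v j 0 + 1)) v).length
          = vocabulary.length := by rw [pv_scatter_len, hv]
      rw [ih _ hlen]
      rw [pv_scatter_inner _ _ k (by omega)
        (fun j hj => by rw [hv]; exact pv_columns_mem vocabulary tok j hj)]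
      rw [pv_columns_count vocabulary tok k hk]
      simp [List.count_cons]
      by_cases h : vocabulary[k] = tok
      · simp [h]; ring
      · simp [h, Ne.symm h]

theorem pv_sentence_len (vocabulary : List String) (sentence : List String) (v : List Int) :
    (sentence.foldl (fun vec token =>
        (((pvColumns vocabulary).getD token []).foldl
          (fun v j => PySem.List.pySetD v j (PySem.List.pyGetD v j 0 + 1)) vec)) v).length
      = v.length := by
  induction sentence generalizing v with
  | nil => rfl
  | cons tok rest ih => simp [List.foldl_cons, ih, pv_scatter_len]

-- the rows agree
theorem pv_row_eq (vocabulary sentence : List String) :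
    vocabulary.foldl (fun aux token => aux ++ [(PySem.List.count sentence token : Int)]) [] =
    sentence.foldl (fun vec token =>
        (((pvColumns vocabulary).getD token []).foldl
          (fun v j => PySem.List.pySetD v j (PySem.List.pyGetD v j 0 + 1)) vec))
      (List.replicate vocabulary.length (0 : Int)) := by
  rw [pv_foldl_append_map]
  apply List.ext_getElem
  · simp [pv_sentence_len]
  · intro k hk hk'
    have hkv : k < vocabulary.length := by simpa using hk
    have hrep : (List.replicate vocabulary.length (0 : Int)).length = vocabulary.length := by simp
    have := pv_scatter_sentence vocabulary sentence _ hrep k hkv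
    rw [List.getD_eq_getElem?_getD, List.getElem?_eq_getElem hk'] at this
    simp only [List.getD_eq_getElem?_getD] at this
    rw [List.getElem?_eq_getElem (by simp [hkv] : k < (List.replicate vocabulary.length (0:Int)).length)] at this
    simp only [List.getElem_replicate, Option.getD_some] at this
    simp [this, PySem.List.count]

-- ===== VERDICT (by name: the statement is the Claim_ definition above) =====
theorem getVectorFrecuency_spec : Claim_equal_getVectorFrecuency := by
  intro vocabulary sentences _
  show getVectorFrecuency vocabulary sentences = getVectorFrecuency_alt vocabulary sentences
  unfold getVectorFrecuency getVectorFrecuency_alt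
  simp only [pv_row_eq]
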